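-- pv_equiv track=rewrite | github.com/brunocamara25/fiap-ai-devs | tech-challenge05/demo/streamlit_app.py | compute_provider_index
-- ===== SOURCE A (Python) =====
-- from typing import List, Dict, Tuple, Any
--
-- def compute_provider_index(names:List[str])->Dict[str, List[int]]:
--     return {
--         "AWS":   [i for i,n in enumerate(names) if n.startswith("aws_") or n.startswith("aws_amazon_")],
--         "Azure": [i for i,n in enumerate(names) if n.startswith("azure_") or n.startswith("microsoft_entra")],
--         "GCP":   [i for i,n in enumerate(names) if n.startswith("gcp_")],
--         "API":   [i for i,n in enumerate(names) if n=="api"],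
--         "Todos": list(range(len(names))),
--     }
-- ===== SOURCE B (Python) =====
-- from typing import List, Dict
--
-- def compute_provider_index(names: List[str]) -> Dict[str, List[int]]:
--     buckets: Dict[str, List[int]] = {"AWS": [], "Azure": [], "GCP": [], "API": [], "Todos": []}
--     for i, n in enumerate(names):
--         buckets["Todos"].append(i)
--         if n.startswith("aws_"):
--             buckets["AWS"].append(i)
--         elif n.startswith("azure_") or n.startswith("microsoft_entra"):
--             buckets["Azure"].append(i)
--         elif n.startswith("gcp_"):
--             buckets["GCP"].append(i)
--         elif n == "api":
--             buckets["API"].append(i)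
--     return buckets
-- ===== Notes on version B (the rewrite author's own statement) =====
-- stated objective: alternative
-- what changed: Replaces four independent enumerate scans plus a separate range build with a single traversal that maintains all five buckets at once via mutually exclusive if/elif branches (startswith('aws_amazon_') is subsumed by startswith('aws_')).
import Mathlib
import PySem

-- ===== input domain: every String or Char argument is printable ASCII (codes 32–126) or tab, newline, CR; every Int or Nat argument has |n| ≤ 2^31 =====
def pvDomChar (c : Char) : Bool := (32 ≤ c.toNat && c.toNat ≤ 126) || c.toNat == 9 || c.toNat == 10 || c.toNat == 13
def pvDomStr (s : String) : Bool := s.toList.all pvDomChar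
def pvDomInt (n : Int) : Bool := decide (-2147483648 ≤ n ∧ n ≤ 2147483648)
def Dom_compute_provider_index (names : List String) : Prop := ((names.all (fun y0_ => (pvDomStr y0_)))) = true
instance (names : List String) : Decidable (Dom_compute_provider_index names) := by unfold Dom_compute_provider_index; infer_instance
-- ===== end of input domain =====

-- B replaces A's four independent enumerate scans plus a range build with one single pass
-- maintaining all five buckets at once (objective: alternative single-pass decomposition).

-- ===== PORT A =====
def compute_provider_index (names : List String) : List (String × List Int) :=
  [ ("AWS", (PySem.List.enumerate names 0).filterMap
      (fun p => if PySem.Str.startswith p.2 "aws_" || PySem.Str.startswith p.2 "aws_amazon_" then some p.1 else none)),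
    ("Azure", (PySem.List.enumerate names 0).filterMap
      (fun p => if PySem.Str.startswith p.2 "azure_" || PySem.Str.startswith p.2 "microsoft_entra" then some p.1 else none)),
    ("GCP", (PySem.List.enumerate names 0).filterMap
      (fun p => if PySem.Str.startswith p.2 "gcp_" then some p.1 else none)),
    ("API", (PySem.List.enumerate names 0).filterMap
      (fun p => if p.2 == "api" then some p.1 else none)),
    ("Todos", PySem.List.pyRange 0 (names.length : Int) 1) ]

-- ===== PORT B =====
-- one pass: five buckets kept together; results are built back-to-front by the recursion,
-- which matches Python's front-to-back appends.
def cpiGo (i : Int) : List String → (List Int × List Int × List Int × List Int × List Int)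
  | [] => ([], [], [], [], [])
  | n :: rest =>
    match cpiGo (i + 1) rest with
    | (aw, az, g, ap, t) =>
      if PySem.Str.startswith n "aws_" then (i :: aw, az, g, ap, i :: t)
      else if PySem.Str.startswith n "azure_" || PySem.Str.startswith n "microsoft_entra" then (aw, i :: az, g, ap, i :: t)
      else if PySem.Str.startswith n "gcp_" then (aw, az, i :: g, ap, i :: t)
      else if n == "api" then (aw, az, g, i :: ap, i :: t)
      else (aw, az, g, ap, i :: t)

def compute_provider_index_alt (names : List String) : List (String × List Int) :=
  match cpiGo 0 names with
  | (aw, az, g, ap, t) => [("AWS", aw), ("Azure", az), ("GCP", g), ("API", ap), ("Todos", t)]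

-- ===== PRECONDITION & SPEC =====
def Spec_compute_provider_index (names : List String) (out : List (String × List Int)) : Prop := out = compute_provider_index_alt names
instance (names : List String) (out : List (String × List Int)) : Decidable (Spec_compute_provider_index names out) := by unfold Spec_compute_provider_index; infer_instance

-- ===== CLAIM (what is proved, stated in full; the proofs are below) =====
def Claim_equal_compute_provider_index : Prop := ∀ (names : List String), Dom_compute_provider_index names → Spec_compute_provider_index names (compute_provider_index names)

-- ===== LEMMAS AND PROOFS =====

-- two incomparable prefixes cannot both be prefixes of the same string
lemma sw_conflict {n p q : String} (hp : PySem.Str.startswith n p = true)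
    (h1 : ¬ (p.toList <+: q.toList)) (h2 : ¬ (q.toList <+: p.toList)) :
    PySem.Str.startswith n q = false := by
  by_contra h
  rw [Bool.not_eq_false] at h
  rw [PySem.Str.startswith_eq, PySem.Chars.startswith_iff] at hp h
  rcases List.prefix_or_prefix_of_prefix hp h with h' | h'
  · exact h1 h'
  · exact h2 h'

-- "aws_amazon_" is subsumed by "aws_"
lemma aws_absorb (n : String) :
    (PySem.Str.startswith n "aws_" || PySem.Str.startswith n "aws_amazon_") = PySem.Str.startswith n "aws_" := by
  cases h : PySem.Str.startswith n "aws_amazon_"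
  · simp
  · have h2 : PySem.Str.startswith n "aws_" = true := by
      rw [PySem.Str.startswith_eq, PySem.Chars.startswith_iff] at h ⊢
      exact List.IsPrefix.trans (by decide) h
    rw [h2]; simp

lemma cpiGo_eq (names : List String) : ∀ i : Int,
    cpiGo i names =
    ((PySem.List.enumerate names i).filterMap
        (fun p => if PySem.Str.startswith p.2 "aws_" || PySem.Str.startswith p.2 "aws_amazon_" then some p.1 else none),
     (PySem.List.enumerate names i).filterMap
        (fun p => if PySem.Str.startswith p.2 "azure_" || PySem.Str.startswith p.2 "microsoft_entra" then some p.1 else none),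
     (PySem.List.enumerate names i).filterMap
        (fun p => if PySem.Str.startswith p.2 "gcp_" then some p.1 else none),
     (PySem.List.enumerate names i).filterMap
        (fun p => if p.2 == "api" then some p.1 else none),
     PySem.List.pyRange i (i + names.length) 1) := by
  induction names with
  | nil =>
    intro i
    simp [cpiGo, PySem.List.enumerate_nil]
  | cons n rest ih =>
    intro i
    have hlen : (i + (((n :: rest).length : Nat) : Int)) = (i + 1) + (rest.length : Nat) := by
      push_cast [List.length_cons]; ring
    have hrange : PySem.List.pyRange i (i + (((n :: rest).length : Nat) : Int)) 1
        = i :: PySem.List.pyRange (i + 1) ((i + 1) + ((rest.length : Nat) : Int)) 1 := by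
      rw [hlen, PySem.List.pyRange_one_cons (by omega)]
    simp only [cpiGo, ih (i + 1), PySem.List.enumerate_cons, List.filterMap_cons, hrange,
      aws_absorb]
    by_cases haws : PySem.Str.startswith n "aws_" = true
    · have h1 := sw_conflict haws (q := "azure_") (by decide) (by decide)
      have h2 := sw_conflict haws (q := "microsoft_entra") (by decide) (by decide)
      have h3 := sw_conflict haws (q := "gcp_") (by decide) (by decide)
      have h4 : (n == "api") = false := by
        by_contra hc
        rw [Bool.not_eq_false, beq_iff_eq] at hc
        subst hc; exact absurd haws (by decide)
      simp only [haws, h1, h2, h3, h4]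
      simp
    · rw [Bool.not_eq_true] at haws
      by_cases haz : (PySem.Str.startswith n "azure_" || PySem.Str.startswith n "microsoft_entra") = true
      · have h3 : PySem.Str.startswith n "gcp_" = false := by
          rcases Bool.or_eq_true_iff.mp haz with h | h
          · exact sw_conflict h (by decide) (by decide)
          · exact sw_conflict h (by decide) (by decide)
        have h4 : (n == "api") = false := by
          by_contra hc
          rw [Bool.not_eq_false, beq_iff_eq] at hc
          subst hc; exact absurd haz (by decide)
        simp only [haws, haz, h3, h4]
        simp
      · rw [Bool.not_eq_true] at haz
        by_cases hg : PySem.Str.startswith n "gcp_" = true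
        · have h4 : (n == "api") = false := by
            by_contra hc
            rw [Bool.not_eq_false, beq_iff_eq] at hc
            subst hc; exact absurd hg (by decide)
          simp only [haws, haz, hg, h4]
          simp
        · rw [Bool.not_eq_true] at hg
          by_cases hapi : (n == "api") = true
          · simp only [haws, haz, hg, hapi]
            simp
          · rw [Bool.not_eq_true] at hapi
            simp only [haws, haz, hg, hapi]
            simp

-- ===== VERDICT (by name: the statement is the Claim_ definition above) =====
theorem compute_provider_index_spec : Claim_equal_compute_provider_index := by
  intro names _
  unfold Spec_compute_provider_index compute_provider_index compute_provider_index_alt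
  rw [cpiGo_eq names 0]
  simp
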